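-- pv_equiv track=rewrite | github.com/tartakovsky/sunstonetales | tools/story_to_html.py | blocks_to_spreads
-- ===== SOURCE A (Python) =====
-- def blocks_to_spreads(blocks):
--     """Group blocks into spreads. Each spread = {image, text}.
--     Strategy: text AFTER an image belongs to that image's spread.
--     Leading text before the first image merges into the first spread.
--     """
--     spreads = []
--     current = None  # {'image': path|None, 'parts': [str]}
--
--     for btype, content in blocks:
--         if btype == 'image':
--             if current is not None:
--                 spreads.append(current)
--             current = {'image': content, 'parts': []}
--         elif btype == 'text':
--             if current is None:
--                 current = {'image': None, 'parts': [content]}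
--             else:
--                 current['parts'].append(content)
--
--     if current is not None:
--         spreads.append(current)
--
--     # Merge leading text-only spread into the first image spread
--     if len(spreads) > 1 and spreads[0]['image'] is None:
--         spreads[1]['parts'] = spreads[0]['parts'] + spreads[1]['parts']
--         spreads.pop(0)
--
--     for s in spreads:
--         s['text'] = '\n\n'.join(s['parts'])
--         del s['parts']
--
--     return spreads
-- ===== SOURCE B (Python) =====
-- def blocks_to_spreads(blocks):
--     """Group blocks into spreads, decomposed as: locate the first image, then
--     group the suffix one image at a time, prepending the leading text."""
--     blocks = list(blocks)
--     idx = next((i for i, (t, c) in enumerate(blocks) if t == 'image'), None)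
--     if idx is None:
--         texts = [c for t, c in blocks if t == 'text']
--         return [{'image': None, 'text': '\n\n'.join(texts)}] if texts else []
--     leading = [c for t, c in blocks[:idx] if t == 'text']
--     groups = []  # list of (image, [parts])
--     for t, c in blocks[idx:]:
--         if t == 'image':
--             groups.append((c, []))
--         elif t == 'text':
--             groups[-1][1].append(c)
--     first_img, first_parts = groups[0]
--     groups[0] = (first_img, leading + first_parts)
--     return [{'image': img, 'text': '\n\n'.join(parts)} for img, parts in groups]
-- ===== Notes on version B (the rewrite author's own statement) =====
-- stated objective: alternative
-- what changed: Replaces A's single stateful current/spreads accumulator loop plus post-hoc merge-and-pop with a split decomposition: find the first image index, filter the leading text from the prefix, group the suffix one image at a time, and render directly (no mutable 'current', no merge pass).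
import Mathlib
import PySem

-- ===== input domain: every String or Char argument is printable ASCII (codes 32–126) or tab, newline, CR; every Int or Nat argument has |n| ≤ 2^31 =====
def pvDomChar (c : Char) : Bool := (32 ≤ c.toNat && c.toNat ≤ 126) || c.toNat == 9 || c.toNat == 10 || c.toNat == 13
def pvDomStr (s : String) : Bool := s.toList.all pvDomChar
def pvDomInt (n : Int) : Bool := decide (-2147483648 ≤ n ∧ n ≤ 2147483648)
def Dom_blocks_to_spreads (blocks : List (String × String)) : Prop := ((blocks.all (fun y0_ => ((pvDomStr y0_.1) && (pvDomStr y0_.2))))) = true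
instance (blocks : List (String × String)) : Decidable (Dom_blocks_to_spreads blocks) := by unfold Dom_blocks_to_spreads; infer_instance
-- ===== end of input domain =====

-- B replaces A's stateful current/spreads loop with post-hoc merge-and-pop by a
-- find-first-image decomposition (alternative structure, same linear cost).

-- ===== PORT A =====
-- loop state: (spreads so far, current spread), a spread being (image, parts)
def aStep (st : List (Option String × List String) × Option (Option String × List String))
    (b : String × String) : List (Option String × List String) × Option (Option String × List String) :=
  if b.1 == "image" then
    (st.1 ++ st.2.toList, some (some b.2, []))
  else if b.1 == "text" then
    match st.2 with
    | none => (st.1, some (none, [b.2]))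
    | some cur => (st.1, some (cur.1, cur.2 ++ [b.2]))
  else st

-- "merge leading text-only spread": spreads[1]['parts'] = spreads[0]['parts'] + …; spreads.pop(0)
def aMerge (spreads : List (Option String × List String)) : List (Option String × List String) :=
  if spreads.length > 1 && ((spreads.headD (none, [])).1 == none) then
    match spreads with
    | s0 :: s1 :: rest => (s1.1, s0.2 ++ s1.2) :: rest
    | l => l
  else spreads

-- s['text'] = '\n\n'.join(s['parts']); del s['parts']
def aRender (s : Option String × List String) : List (String × Option String) :=
  [("image", s.1), ("text", some (PySem.Str.join "\n\n" s.2))]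

def blocks_to_spreads (blocks : List (String × String)) : List (List (String × Option String)) :=
  let st := blocks.foldl aStep ([], none)
  let spreads := st.1 ++ st.2.toList
  (aMerge spreads).map aRender

-- ===== PORT B =====
-- groups[-1][1].append(c); the [] case is unreachable in B (the suffix starts with an image,
-- where Python would raise IndexError)
def bAppendLast : List (String × List String) → String → List (String × List String)
  | [], _ => []
  | [(i, ps)], c => [(i, ps ++ [c])]
  | x :: xs, c => x :: bAppendLast xs c

def bGroupStep (acc : List (String × List String)) (b : String × String) : List (String × List String) :=
  if b.1 == "image" then acc ++ [(b.2, [])]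
  else if b.1 == "text" then bAppendLast acc b.2
  else acc

def blocks_to_spreads_alt (blocks : List (String × String)) : List (List (String × Option String)) :=
  match blocks.findIdx? (fun b => b.1 == "image") with
  | none =>
    let texts := (blocks.filter (fun b => b.1 == "text")).map Prod.snd
    if texts.isEmpty then []
    else [[("image", none), ("text", some (PySem.Str.join "\n\n" texts))]]
  | some i =>
    let leading := ((blocks.take i).filter (fun b => b.1 == "text")).map Prod.snd
    let groups := (blocks.drop i).foldl bGroupStep []
    let groups' :=
      match groups with
      | g0 :: rest => (g0.1, leading ++ g0.2) :: rest
      | [] => []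
    groups'.map (fun g => [("image", some g.1), ("text", some (PySem.Str.join "\n\n" g.2))])

-- ===== PRECONDITION & SPEC =====
def Spec_blocks_to_spreads (blocks : List (String × String)) (out : List (List (String × Option String))) : Prop := out = blocks_to_spreads_alt blocks
instance (blocks : List (String × String)) (out : List (List (String × Option String))) : Decidable (Spec_blocks_to_spreads blocks out) := by unfold Spec_blocks_to_spreads; infer_instance

-- ===== CLAIM (what is proved, stated in full; the proofs are below) =====
def Claim_equal_blocks_to_spreads : Prop := ∀ (blocks : List (String × String)), Dom_blocks_to_spreads blocks → Spec_blocks_to_spreads blocks (blocks_to_spreads blocks)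

-- ===== LEMMAS AND PROOFS =====

-- a text-only A-current built from the accumulated text contents
def optTexts : List String → Option (Option String × List String)
  | [] => none
  | ts => some (none, ts)

def liftG (g : String × List String) : Option String × List String := (some g.1, g.2)

-- A's loop state as a function of B's (nonempty) group accumulator
def stateOf (sp : List (Option String × List String)) (acc : List (String × List String)) :
    List (Option String × List String) × Option (Option String × List String) :=
  (sp ++ acc.dropLast.map liftG, acc.getLast?.map liftG)

theorem optTexts_nil : optTexts [] = none := rfl
theorem optTexts_cons (t : String) (ts : List String) : optTexts (t :: ts) = some (none, t :: ts) := rfl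

theorem bAppendLast_concat (front : List (String × List String)) (g : String × List String)
    (c : String) : bAppendLast (front ++ [g]) c = front ++ [(g.1, g.2 ++ [c])] := by
  obtain ⟨i0, ps0⟩ := g
  induction front with
  | nil => rfl
  | cons x front ih =>
    cases front with
    | nil => rfl
    | cons y front' =>
      show x :: bAppendLast ((y :: front') ++ [(i0, ps0)]) c = _
      rw [ih]
      rfl

theorem bAppendLast_ne_nil (acc : List (String × List String)) (c : String) (h : acc ≠ []) :
    bAppendLast acc c ≠ [] := by
  cases acc with
  | nil => exact absurd rfl h
  | cons x xs => cases xs with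
    | nil => obtain ⟨i, ps⟩ := x; simp [bAppendLast]
    | cons y ys => simp [bAppendLast]

theorem bGroupStep_ne_nil (acc : List (String × List String)) (b : String × String) (h : acc ≠ []) :
    bGroupStep acc b ≠ [] := by
  unfold bGroupStep
  split_ifs with h1 h2
  · simp
  · exact bAppendLast_ne_nil acc b.2 h
  · exact h

theorem foldl_bGroupStep_ne_nil (rest : List (String × String)) (acc : List (String × List String))
    (h : acc ≠ []) : rest.foldl bGroupStep acc ≠ [] := by
  induction rest generalizing acc with
  | nil => exact h
  | cons b rest ih => exact ih _ (bGroupStep_ne_nil acc b h)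

-- one step of the suffix invariant
theorem aStep_stateOf (sp : List (Option String × List String)) (acc : List (String × List String))
    (b : String × String) (h : acc ≠ []) :
    aStep (stateOf sp acc) b = stateOf sp (bGroupStep acc b) := by
  rcases List.eq_nil_or_concat acc with rfl | ⟨front, g, rfl⟩
  · exact absurd rfl h
  · simp only [List.concat_eq_append]
    by_cases hb : (b.1 == "image") = true
    · simp [aStep, bGroupStep, stateOf, hb, liftG, List.map_append, List.append_assoc]
    · by_cases ht : (b.1 == "text") = true
      · have : bGroupStep (front ++ [g]) b = front ++ [(g.1, g.2 ++ [b.2])] := by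
          simp [bGroupStep, hb, ht, bAppendLast_concat]
        rw [this]
        simp [aStep, stateOf, hb, ht, liftG]
      · simp [aStep, bGroupStep, stateOf, hb, ht]

-- the suffix invariant
theorem foldl_aStep_stateOf (rest : List (String × String)) (acc : List (String × List String))
    (sp : List (Option String × List String)) (h : acc ≠ []) :
    rest.foldl aStep (stateOf sp acc) = stateOf sp (rest.foldl bGroupStep acc) := by
  induction rest generalizing acc with
  | nil => rfl
  | cons b rest ih =>
    simp only [List.foldl_cons]
    rw [aStep_stateOf sp acc b h]
    exact ih _ (bGroupStep_ne_nil acc b h)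

-- the prefix (no image yet) invariant
theorem foldl_aStep_prefix (pre : List (String × String))
    (h : ∀ b ∈ pre, (b.1 == "image") = false) : ∀ ts : List String,
    pre.foldl aStep ([], optTexts ts)
      = ([], optTexts (ts ++ (pre.filter (fun b => b.1 == "text")).map Prod.snd)) := by
  induction pre with
  | nil => intro ts; simp
  | cons b pre ih =>
    intro ts
    have hb : (b.1 == "image") = false := h b List.mem_cons_self
    have h' : ∀ x ∈ pre, (x.1 == "image") = false := fun x hx => h x (List.mem_cons_of_mem _ hx)
    by_cases ht : (b.1 == "text") = true
    · have step : aStep ([], optTexts ts) b = ([], optTexts (ts ++ [b.2])) := by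
        cases ts with
        | nil => simp [aStep, hb, ht, optTexts]
        | cons t ts' => simp [aStep, hb, ht, optTexts]
      rw [List.foldl_cons, step, ih h' (ts ++ [b.2])]
      simp [ht]
    · have hf : (b.1 == "text") = false := by simpa using ht
      have step : aStep ([], optTexts ts) b = ([], optTexts ts) := by
        simp [aStep, hb, hf]
      rw [List.foldl_cons, step, ih h' ts]
      simp [hf]

-- aMerge does nothing when the first spread has an image
theorem aMerge_map_liftG (l : List (String × List String)) : aMerge (l.map liftG) = l.map liftG := by
  cases l with
  | nil => rfl
  | cons x l' => simp [aMerge, liftG]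

theorem blocks_to_spreads_eq_alt (blocks : List (String × String)) :
    blocks_to_spreads blocks = blocks_to_spreads_alt blocks := by
  cases h : blocks.findIdx? (fun b => b.1 == "image") with
  | none =>
    have hall : ∀ b ∈ blocks, (b.1 == "image") = false := List.findIdx?_eq_none_iff.mp h
    have hfold := foldl_aStep_prefix blocks hall []
    simp only [optTexts_nil, List.nil_append] at hfold
    unfold blocks_to_spreads blocks_to_spreads_alt
    rw [h]
    simp only [hfold]
    cases htx : (blocks.filter (fun b => b.1 == "text")).map Prod.snd with
    | nil => simp [optTexts, aMerge]
    | cons t ts => simp [optTexts, aMerge, aRender]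
  | some i =>
    obtain ⟨hi, hp, hbefore⟩ := List.findIdx?_eq_some_iff_getElem.mp h
    have hpre : ∀ b ∈ blocks.take i, (b.1 == "image") = false := by
      intro b hb
      obtain ⟨j, hj, rfl⟩ := List.getElem_of_mem hb
      have hj' : j < i := by
        have := hj
        simp only [List.length_take] at this
        omega
      rw [List.getElem_take]
      simpa using hbefore j hj'
    have hfold := foldl_aStep_prefix (blocks.take i) hpre []
    simp only [optTexts_nil, List.nil_append] at hfold
    set lead := ((blocks.take i).filter (fun b => b.1 == "text")).map Prod.snd with hlead
    have hdrop : blocks.drop i = blocks[i] :: blocks.drop (i + 1) := List.drop_eq_getElem_cons hi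
    set G := (blocks.drop (i + 1)).foldl bGroupStep [(blocks[i].2, [])] with hG
    have hGne : G ≠ [] := foldl_bGroupStep_ne_nil _ _ (by simp)
    have hstep : aStep ([], optTexts lead) blocks[i]
        = stateOf ((optTexts lead).toList) [(blocks[i].2, [])] := by
      simp [aStep, hp, stateOf, liftG]
    have hA : blocks.foldl aStep ([], none) = stateOf ((optTexts lead).toList) G := by
      conv_lhs => rw [← List.take_append_drop i blocks]
      rw [List.foldl_append, hfold, hdrop, List.foldl_cons, hstep,
        foldl_aStep_stateOf _ _ _ (by simp)]
    have hBg : (blocks.drop i).foldl bGroupStep [] = G := by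
      rw [hdrop, List.foldl_cons]
      simp [bGroupStep, hp, hG]
    have hsp : (blocks.foldl aStep ([], none)).1 ++ (blocks.foldl aStep ([], none)).2.toList
        = (optTexts lead).toList ++ G.map liftG := by
      rcases List.eq_nil_or_concat G with hnil | ⟨front, g, hGeq⟩
      · exact absurd hnil hGne
      · rw [hA, hGeq]
        simp [stateOf, List.concat_eq_append, List.map_append, List.append_assoc]
    obtain ⟨g0, grest, hGcons⟩ : ∃ g0 grest, G = g0 :: grest := by
      cases hc : G with
      | nil => exact absurd hc hGne
      | cons a l => exact ⟨a, l, rfl⟩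
    unfold blocks_to_spreads blocks_to_spreads_alt
    rw [h]
    simp only [hsp, hBg, hGcons]
    cases hL : lead with
    | nil =>
      simp only [optTexts_nil, Option.toList_none, List.nil_append]
      rw [aMerge_map_liftG]
      simp [aRender, liftG, List.map_map, Function.comp_def, ← hlead, hL]
    | cons t ts =>
      simp only [optTexts_cons, Option.toList_some, List.map_cons, List.singleton_append]
      simp [aMerge, liftG, aRender, List.map_map, Function.comp_def, ← hlead, hL]

-- ===== VERDICT (by name: the statement is the Claim_ definition above) =====
theorem blocks_to_spreads_spec : Claim_equal_blocks_to_spreads := by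
  intro blocks _
  unfold Spec_blocks_to_spreads
  exact blocks_to_spreads_eq_alt blocks
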